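-- pv_equiv track=rewrite | github.com/VectorCANoe/canoe-driving-alert | canoe/AGENT/canoe/scripts/navigation_simulator.py | serpentine_path
-- ===== SOURCE A (Python) =====
-- from typing import Callable, Dict, List, Optional, Tuple
--
-- def serpentine_path(width: int, height: int) -> List[Tuple[int, int]]:
--     path: List[Tuple[int, int]] = []
--     for y in range(height):
--         if y % 2 == 0:
--             xs = range(width)
--         else:
--             xs = range(width - 1, -1, -1)
--         for x in xs:
--             path.append((x, y))
--     return path
-- ===== SOURCE B (Python) =====
-- def serpentine_path(width, height):
--     if width <= 0 or height <= 0: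
--         return []
--     path = []
--     for i in range(width * height):
--         y, c = divmod(i, width)
--         path.append((c if y % 2 == 0 else width - 1 - c, y))
--     return path
-- ===== Notes on version B (the rewrite author's own statement) =====
-- stated objective: alternative
-- what changed: Replaces the nested row loops (with a reversed inner range on odd rows) by one flat pass over range(width*height), recovering each cell's row and column by divmod and a closed-form column formula.
import Mathlib
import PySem

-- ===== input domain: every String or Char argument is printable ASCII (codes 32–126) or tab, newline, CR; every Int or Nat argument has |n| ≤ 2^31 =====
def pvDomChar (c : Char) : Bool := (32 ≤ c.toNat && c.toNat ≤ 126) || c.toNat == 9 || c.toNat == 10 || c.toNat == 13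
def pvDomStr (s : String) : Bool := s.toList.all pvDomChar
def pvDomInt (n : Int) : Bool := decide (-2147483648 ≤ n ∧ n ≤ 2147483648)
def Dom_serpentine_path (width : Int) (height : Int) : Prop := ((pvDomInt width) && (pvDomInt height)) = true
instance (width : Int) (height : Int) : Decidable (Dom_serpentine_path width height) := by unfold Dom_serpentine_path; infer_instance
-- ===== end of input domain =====

-- B replaces A's nested row loops by one flat pass over range(width*height) with a
-- closed-form divmod column formula (objective: alternative).

-- ===== PORT A =====
def serpentine_path (width : Int) (height : Int) : List (Int × Int) :=
  (PySem.List.pyRange 0 height 1).foldl (fun path y =>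
    let xs := if PySem.Int.mod y 2 == 0
      then PySem.List.pyRange 0 width 1
      else PySem.List.pyRange (width - 1) (-1) (-1)
    xs.foldl (fun p x => p ++ [(x, y)]) path) []

-- ===== PORT B =====
def serpentine_path_alt (width : Int) (height : Int) : List (Int × Int) :=
  if width ≤ 0 ∨ height ≤ 0 then []
  else (PySem.List.pyRange 0 (width * height) 1).foldl (fun path i =>
    -- 'y, c = divmod(i, width)' ported as (floordiv, mod): exact here since width ≠ 0 in this branch
    let y := PySem.Int.floordiv i width
    let c := PySem.Int.mod i width
    path ++ [(if PySem.Int.mod y 2 == 0 then c else width - 1 - c, y)]) []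

-- ===== PRECONDITION & SPEC =====
def Spec_serpentine_path (width : Int) (height : Int) (out : List (Int × Int)) : Prop := out = serpentine_path_alt width height
instance (width : Int) (height : Int) (out : List (Int × Int)) : Decidable (Spec_serpentine_path width height out) := by unfold Spec_serpentine_path; infer_instance

-- ===== CLAIM (what is proved, stated in full; the proofs are below) =====
def Claim_equal_serpentine_path : Prop := ∀ (width : Int) (height : Int), Dom_serpentine_path width height → Spec_serpentine_path width height (serpentine_path width height)

-- ===== LEMMAS AND PROOFS =====

-- A's y-th row as a list.
def pvRow (w y : Int) : List (Int × Int) :=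
  (if PySem.Int.mod y 2 == 0
     then PySem.List.pyRange 0 w 1
     else PySem.List.pyRange (w - 1) (-1) (-1)).map (fun x => (x, y))

-- B's per-index cell function.
def pvCell (w : Int) (i : Int) : Int × Int :=
  (if PySem.Int.mod (PySem.Int.floordiv i w) 2 == 0
     then PySem.Int.mod i w
     else w - 1 - PySem.Int.mod i w,
   PySem.Int.floordiv i w)

lemma serpentine_eq_flatMap (w h : Int) :
    serpentine_path w h = (PySem.List.pyRange 0 h 1).flatMap (pvRow w) := by
  unfold serpentine_path
  calc (PySem.List.pyRange 0 h 1).foldl (fun path y =>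
          ((if PySem.Int.mod y 2 == 0
              then PySem.List.pyRange 0 w 1
              else PySem.List.pyRange (w - 1) (-1) (-1))).foldl
            (fun p x => p ++ [(x, y)]) path) []
      = (PySem.List.pyRange 0 h 1).foldl (fun path y => path ++ pvRow w y) [] := by
        apply PySem.List.foldl_congr_mem
        intro path y _
        rw [PySem.List.foldl_append_singleton_eq_map]
        rfl
    _ = (PySem.List.pyRange 0 h 1).flatMap (pvRow w) := by
        rw [PySem.List.foldl_append_eq_flatMap]
        simp

lemma floordiv_chunk (w h k : Int) (hw : 0 < w) (hk0 : 0 ≤ k) (hkw : k < w) :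
    PySem.Int.floordiv (w * h + k) w = h := by
  rw [PySem.Int.floordiv_eq_iff_of_pos hw]
  constructor <;> nlinarith

lemma mod_chunk (w h k : Int) (hw : 0 < w) (hk0 : 0 ≤ k) (hkw : k < w) :
    PySem.Int.mod (w * h + k) w = k := by
  have hd := PySem.Int.floordiv_mul_add_mod (w * h + k) w
  rw [floordiv_chunk w h k hw hk0 hkw] at hd
  linarith

-- the chunk of B's flat pass covering row h equals A's row h
lemma chunk_eq_row (w h : Int) (hw : 0 < w) :
    (PySem.List.pyRange (w * h) (w * h + w) 1).map (pvCell w) = pvRow w h := by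
  rw [PySem.List.pyRange_one]
  unfold pvRow
  have hwn : w * h + w - w * h = w := by ring
  rw [hwn]
  by_cases hpar : PySem.Int.mod h 2 == 0
  · rw [if_pos hpar, PySem.List.pyRange_one]
    simp only [List.map_map, Int.sub_zero]
    apply List.map_congr_left
    intro k hk
    have hk' : (k : Int) < w := by
      have := List.mem_range.mp hk
      omega
    have hk0 : (0 : Int) ≤ (k : Int) := Int.natCast_nonneg k
    unfold pvCell
    simp only [Function.comp_apply]
    rw [floordiv_chunk w h k hw hk0 hk', mod_chunk w h k hw hk0 hk', if_pos hpar]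
    simp
  · rw [if_neg hpar, PySem.List.pyRange_neg_one]
    have hwn2 : w - 1 - -1 = w := by ring
    rw [hwn2]
    simp only [List.map_map]
    apply List.map_congr_left
    intro k hk
    have hk' : (k : Int) < w := by
      have := List.mem_range.mp hk
      omega
    have hk0 : (0 : Int) ≤ (k : Int) := Int.natCast_nonneg k
    unfold pvCell
    simp only [Function.comp_apply]
    rw [floordiv_chunk w h k hw hk0 hk', mod_chunk w h k hw hk0 hk', if_neg hpar]

lemma main_pos (w : Int) (hw : 0 < w) (n : Nat) :
    (PySem.List.pyRange 0 (n : Int) 1).flatMap (pvRow w)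
      = (PySem.List.pyRange 0 (w * n) 1).map (pvCell w) := by
  induction n with
  | zero => simp [PySem.List.pyRange_one_eq_nil]
  | succ m ih =>
    have h1 : ((m + 1 : Nat) : Int) = (m : Int) + 1 := by push_cast; ring
    rw [h1, PySem.List.pyRange_one_succ_right (Int.natCast_nonneg m),
        List.flatMap_append, ih]
    have h2 : (0 : Int) ≤ w * m := by positivity
    have h3 : w * m ≤ w * ((m : Int) + 1) := by nlinarith
    have h4 : w * ((m : Int) + 1) = w * m + w := by ring
    rw [PySem.List.pyRange_one_append 0 (w * m) (w * ((m : Int) + 1)) h2 h3,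
        List.map_append, h4, chunk_eq_row w (m : Int) hw]
    simp [pvRow]

-- ===== VERDICT (by name: the statement is the Claim_ definition above) =====
theorem serpentine_path_spec : Claim_equal_serpentine_path := by
  intro w h _
  unfold Spec_serpentine_path serpentine_path_alt
  rw [serpentine_eq_flatMap]
  by_cases hz : w ≤ 0 ∨ h ≤ 0
  · rw [if_pos hz]
    rcases hz with hz | hz
    · apply List.flatMap_eq_nil_iff.mpr
      intro y _
      unfold pvRow
      by_cases hpar : PySem.Int.mod y 2 == 0
      · rw [if_pos hpar, PySem.List.pyRange_one_eq_nil (by omega)]; rfl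
      · rw [if_neg hpar, PySem.List.pyRange_neg_one_eq_nil (by omega)]; rfl
    · rw [PySem.List.pyRange_one_eq_nil (by omega)]; rfl
  · rw [if_neg hz]
    rw [not_or, not_le, not_le] at hz
    obtain ⟨hw, hh⟩ := hz
    obtain ⟨n, rfl⟩ : ∃ n : Nat, h = (n : Int) :=
      ⟨h.toNat, (Int.toNat_of_nonneg (by omega)).symm⟩
    have hfold : (PySem.List.pyRange 0 (w * (n : Int)) 1).foldl
        (fun p i => p ++ [pvCell w i]) ([] : List (Int × Int))
        = (PySem.List.pyRange 0 (w * (n : Int)) 1).map (pvCell w) := by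
      rw [PySem.List.foldl_append_singleton_eq_map]; simp
    rw [main_pos w hw n, ← hfold]
    rfl
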